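-- pv_equiv track=rewrite | github.com/AbakarovGasan/output | I.py/I.py/коллекция.py | dip
-- ===== SOURCE A (Python) =====
-- dct=[2,3]
--
-- def vi(q):
--         while  len(dct)<=q:
--             v=dct[-1]
--             while True:
--                 v+=1
--                 p=False
--                 for i in dct:
--                     if not v%i:
--                         p=True
--                         break
--                 if not p:break
--             dct.append(v)
--         return dct[q]
--
-- def dip(q,i):
--     b=i
--     t=vi(0)
--     p=0
--     c=1
--     while t<q:
--         while not (i%t or q%t):
--             i//=t
--             q//=t
--             c*=t
--         p+=1
--         t=vi(p)
--     return b//c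
-- ===== SOURCE B (Python) =====
-- def dip(q, i):
--     # Remove from i every factor it shares with q: divide i by gcd(i, q).
--     # For q <= 1 there are no factors to remove.
--     if q <= 1:
--         return i
--     g, r = abs(i), q
--     while r:
--         g, r = r, g % r
--     return i // g
-- ===== Notes on version B (the rewrite author's own statement) =====
-- stated objective: faster
-- what changed: A enumerates primes one by one in a cached table (each new prime found by trial division against all earlier primes) and walks that table dividing out common factors; B computes gcd(i, q) with one Euclidean loop and divides once.
-- intended difference: When q >= 2 divides i (i != 0) and the largest prime factor p of q occurs only once in q, A's 'while t < q' bound stops just before dividing out that last prime, so A returns i//(q/p) (e.g. dip(6,6)=3) while B returns the fully reduced i//gcd(i,q)=i//q (dip(6,6)=1), which is the intended complete removal of common factors. — e.g. on dip(6, 6): A returns 3, B returns 1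
import Mathlib
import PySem

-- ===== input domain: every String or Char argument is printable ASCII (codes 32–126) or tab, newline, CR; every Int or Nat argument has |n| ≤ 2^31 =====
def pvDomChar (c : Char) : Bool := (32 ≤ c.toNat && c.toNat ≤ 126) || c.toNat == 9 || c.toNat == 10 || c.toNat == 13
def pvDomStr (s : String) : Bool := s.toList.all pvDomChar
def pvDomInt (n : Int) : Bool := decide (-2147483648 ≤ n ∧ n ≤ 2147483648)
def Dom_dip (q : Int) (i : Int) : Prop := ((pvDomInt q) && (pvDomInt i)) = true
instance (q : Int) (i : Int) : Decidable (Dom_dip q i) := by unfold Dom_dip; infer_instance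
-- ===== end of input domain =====

-- B replaces A's quadratic prime-table enumeration by a single Euclidean gcd (objective:
-- faster); on the D_dip inputs below A stops one prime short of the full reduction and B
-- returns the fully reduced value.

-- ===== PORT A =====
-- the inner `while True: v += 1 …` of vi: first v' > v with no divisor in dct.
-- fuel = (product of dct) + 1 - v steps always suffice on the states A reaches
-- (the fallback value is unreachable there; Python diverges only where dct is malformed).
def findV (dct : List Int) (v : Int) (fuel : Nat) : Int :=
  match fuel with
  | 0 => v + 1
  | f + 1 =>
    let v' := v + 1
    if dct.any (fun d => PySem.Int.mod v' d == 0) then findV dct v' f else v'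

-- one execution of vi's outer-loop body: v = dct[-1]; search; append
def nextCand (dct : List Int) : Int :=
  let v := (PySem.List.pyGet? dct (-1)).getD 0
  findV dct v ((dct.foldl (· * ·) 1 + 1 - v).toNat)

-- `while len(dct) <= q: … dct.append(v)`
def growDct (dct : List Int) (q : Int) : List Int :=
  if h : (dct.length : Int) ≤ q then growDct (dct ++ [nextCand dct]) q else dct
termination_by (q + 1 - dct.length).toNat
decreasing_by simp only [List.length_append, List.length_cons, List.length_nil]; omega

-- vi, with the global dct threaded through
def vi (dct : List Int) (q : Int) : Int × List Int :=
  let d := growDct dct q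
  ((PySem.List.pyGet? d q).getD 0, d)

-- `while not (i%t or q%t): i//=t; q//=t; c*=t` (the natAbs guard only makes the
-- recursion total; it never fires on states A reaches, where Python also terminates)
def dipInner (i q c t : Int) : Int × Int × Int :=
  if PySem.Int.mod i t = 0 ∧ PySem.Int.mod q t = 0 then
    if h : (PySem.Int.floordiv q t).natAbs < q.natAbs then
      dipInner (PySem.Int.floordiv i t) (PySem.Int.floordiv q t) (c * t) t
    else (i, q, c)
  else (i, q, c)
termination_by q.natAbs

-- `while t < q: …` (again, the toNat guard is a totality guard, never hit on A's states)
def dipOuter (dct : List Int) (i q c p t : Int) : Int :=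
  if t < q then
    let r := dipInner i q c t
    let p' := p + 1
    let v := vi dct p'
    if h : (r.2.1 - v.1).toNat < (q - t).toNat then dipOuter v.2 r.1 r.2.1 r.2.2 p' v.1 else r.2.2
  else c
termination_by (q - t).toNat
decreasing_by exact h

def dip (q : Int) (i : Int) : Int :=
  let b := i
  let td := vi [2, 3] 0
  let c := dipOuter td.2 i q 1 0 td.1
  PySem.Int.floordiv b c

-- ===== PORT B =====
-- `g, r = abs(i), q; while r > 0: g, r = r, g % r`
def euclid (g r : Int) : Int :=
  if h : 0 < r then euclid r (PySem.Int.mod g r) else g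
termination_by r.toNat
decreasing_by
  have h1 : 0 ≤ PySem.Int.mod g r := PySem.Int.mod_nonneg g h
  have h2 : PySem.Int.mod g r < r := PySem.Int.mod_lt g h
  omega

def dip_alt (q : Int) (i : Int) : Int :=
  if q ≤ 1 then i
  else
    let g := euclid (if 0 ≤ i then i else -i) q
    PySem.Int.floordiv i g

-- ===== PRECONDITION & SPEC =====
-- helpers used by D_dip: largest prime factor of a natural number (trial division)
-- smallest divisor d of n with k ≤ d (n itself when none reaches sqrt n)
def smallFac (n k fuel : Nat) : Nat :=
  if n < k * k then n
  else match fuel with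
    | 0 => n
    | f + 1 => if n % k = 0 then k else smallFac n (k + 1) f

def lpfAux (n fuel : Nat) : Nat :=
  match fuel with
  | 0 => 0
  | f + 1 => if n < 2 then 0 else
      max (smallFac n 2 n) (lpfAux (n / smallFac n 2 n) f)

-- largest prime factor of n (0 when n < 2)
def lpf (n : Nat) : Nat := lpfAux n n

-- When q ≥ 2 divides i (i ≠ 0) and the largest prime factor p of q occurs only once in q,
-- A's `while t < q` bound stops just before dividing out that last prime, so A returns
-- i//(q/p) while B returns the fully reduced i//gcd(i,q) = i//q, the intended complete
-- removal of the factors i shares with q.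
def D_dip (q : Int) (i : Int) : Prop :=
  2 ≤ q ∧ q ∣ i ∧ i ≠ 0 ∧ ¬ ((lpf q.toNat : Int) * (lpf q.toNat : Int) ∣ q)
instance (q : Int) (i : Int) : Decidable (D_dip q i) := by unfold D_dip; infer_instance

def Spec_dip (q : Int) (i : Int) (out : Int) : Prop := ¬ D_dip q i → out = dip_alt q i
instance (q : Int) (i : Int) (out : Int) : Decidable (Spec_dip q i out) := by unfold Spec_dip; infer_instance

def pvDiffWitness_dip : Int × Int := (6, 6)
def pvDiffWitnessOut_dip : Int × Int := (3, 1)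

-- ===== CLAIM (what is proved, stated in full; the proofs are below) =====
def Claim_unchanged_dip : Prop := ∀ (q : Int) (i : Int), Dom_dip q i → Spec_dip q i (dip q i)
def Claim_changed_dip : Prop := Dom_dip (pvDiffWitness_dip.1) (pvDiffWitness_dip.2) ∧ D_dip (pvDiffWitness_dip.1) (pvDiffWitness_dip.2) ∧ dip (pvDiffWitness_dip.1) (pvDiffWitness_dip.2) = pvDiffWitnessOut_dip.1 ∧ dip_alt (pvDiffWitness_dip.1) (pvDiffWitness_dip.2) = pvDiffWitnessOut_dip.2 ∧ pvDiffWitnessOut_dip.1 ≠ pvDiffWitnessOut_dip.2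
def Claim_exact_dip : Prop := ∀ (q : Int) (i : Int), Dom_dip q i → D_dip q i → dip q i ≠ dip_alt q i

-- ===== LEMMAS AND PROOFS =====

-- reference loop: the same divide-out loop run over ALL candidates t = 2, 3, 4, …, stop at t ≥ q
def refLoop (i q c t : Int) : Int :=
  if t < q then
    let r := dipInner i q c t
    if h : (r.2.1 - (t + 1)).toNat < (q - t).toNat then refLoop r.1 r.2.1 r.2.2 (t + 1) else r.2.2
  else c
termination_by (q - t).toNat
decreasing_by exact h

-- the divisor B divides by, and (proved below) the divisor A's loop accumulates
def rhsDiv (q i : Int) : Int :=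
  if 2 ≤ q ∧ q ∣ i ∧ ¬ ((lpf q.toNat : Int) * (lpf q.toNat : Int) ∣ q)
  then q / (lpf q.toNat : Int)
  else (Int.gcd i q : Int)

theorem ediv_lt_self' {a b : Int} (ha : 0 < a) (hb : 1 < b) : a / b < a := by
  have h1 := Int.emod_nonneg a (by omega : b ≠ 0)
  have h2 := Int.mul_ediv_add_emod a b
  have h4 : 0 ≤ a / b := Int.ediv_nonneg (by omega) (by omega)
  nlinarith [h2, h1, h4, mul_le_mul_of_nonneg_right (by omega : 2 ≤ b) h4]

theorem dvd_ediv_of_dvd {a b : Int} (hb : b ≠ 0) (h : b ∣ a) : a / b ∣ a := by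
  rcases h with ⟨k, hk⟩
  subst hk
  rw [Int.mul_ediv_cancel_left k hb]
  exact ⟨b, mul_comm b k⟩

theorem dipInner_stop {i q c t : Int} (h : ¬ (t ∣ i ∧ t ∣ q)) : dipInner i q c t = (i, q, c) := by
  rw [dipInner]
  simp only [PySem.Int.mod_eq_zero_iff_dvd]
  rw [if_neg h]

theorem dipInner_step {i q c t : Int} (ht : 2 ≤ t) (hq : 1 ≤ q) (hi : t ∣ i) (hqd : t ∣ q) :
    dipInner i q c t = dipInner (i / t) (q / t) (c * t) t := by
  have h0 : (0:Int) < t := by omega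
  have hfq : PySem.Int.floordiv q t = q / t := PySem.Int.floordiv_eq_ediv_of_pos h0
  have hfi : PySem.Int.floordiv i t = i / t := PySem.Int.floordiv_eq_ediv_of_pos h0
  have hlt : q / t < q := ediv_lt_self' (by omega) (by omega)
  have hge : 0 ≤ q / t := Int.ediv_nonneg (by omega) (by omega)
  rw [dipInner]
  simp only [PySem.Int.mod_eq_zero_iff_dvd]
  rw [if_pos ⟨hi, hqd⟩, dif_pos (by rw [hfq]; omega), hfq, hfi]

theorem dipInner_spec_aux : ∀ (n : Nat) (i q c t : Int), 2 ≤ t → 1 ≤ q → q.natAbs ≤ n →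
    (dipInner i q c t).1 ∣ i ∧ (dipInner i q c t).2.1 ∣ q ∧ 1 ≤ (dipInner i q c t).2.1 ∧
      ¬ (t ∣ (dipInner i q c t).1 ∧ t ∣ (dipInner i q c t).2.1) := by
  intro n
  induction n with
  | zero => intro i q c t ht hq hn; omega
  | succ n ih =>
    intro i q c t ht hq hn
    by_cases hd : t ∣ i ∧ t ∣ q
    · have h0 : (0:Int) < t := by omega
      have hlt : q / t < q := ediv_lt_self' (by omega) (by omega)
      have hge : 1 ≤ q / t := by
        rcases hd.2 with ⟨k, hk⟩
        have hk1 : 1 ≤ k := by nlinarith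
        have : q / t = k := by rw [hk]; exact Int.mul_ediv_cancel_left k (by omega)
        omega
      rw [dipInner_step ht hq hd.1 hd.2]
      have hrec := ih (i / t) (q / t) (c * t) t ht hge (by omega)
      exact ⟨dvd_trans hrec.1 (dvd_ediv_of_dvd (by omega) hd.1),
             dvd_trans hrec.2.1 (dvd_ediv_of_dvd (by omega) hd.2),
             hrec.2.2.1, hrec.2.2.2⟩
    · rw [dipInner_stop hd]
      push_neg at hd
      exact ⟨dvd_refl i, dvd_refl q, hq, by tauto⟩

theorem dipInner_spec {i q c t : Int} (ht : 2 ≤ t) (hq : 1 ≤ q) :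
    (dipInner i q c t).1 ∣ i ∧ (dipInner i q c t).2.1 ∣ q ∧ 1 ≤ (dipInner i q c t).2.1 ∧
      ¬ (t ∣ (dipInner i q c t).1 ∧ t ∣ (dipInner i q c t).2.1) :=
  dipInner_spec_aux q.natAbs i q c t ht hq le_rfl

-- full decomposition of the inner loop: it divides out exactly t^m from both sides
theorem dipInner_decomp_aux : ∀ (n : Nat) (i q c t : Int), 2 ≤ t → 1 ≤ q → q.natAbs ≤ n →
    ∃ (m : Nat) (i' q' : Int), dipInner i q c t = (i', q', c * t ^ m) ∧
      i = t ^ m * i' ∧ q = t ^ m * q' ∧ ¬ (t ∣ i' ∧ t ∣ q') ∧ (t ∣ i ∧ t ∣ q → 1 ≤ m) := by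
  intro n
  induction n with
  | zero => intro i q c t ht hq hn; omega
  | succ n ih =>
    intro i q c t ht hq hn
    by_cases hd : t ∣ i ∧ t ∣ q
    · have h0 : (0:Int) < t := by omega
      have hlt : q / t < q := ediv_lt_self' (by omega) (by omega)
      have hge : 1 ≤ q / t := by
        rcases hd.2 with ⟨k, hk⟩
        have hk1 : 1 ≤ k := by nlinarith
        have : q / t = k := by rw [hk]; exact Int.mul_ediv_cancel_left k (by omega)
        omega
      rw [dipInner_step ht hq hd.1 hd.2]
      obtain ⟨m, i', q', hEq, hi, hq', hnd, _⟩ := ih (i / t) (q / t) (c * t) t ht hge (by omega)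
      refine ⟨m + 1, i', q', ?_, ?_, ?_, hnd, fun _ => by omega⟩
      · rw [hEq]; congr 1; ring
      · have : i = t * (i / t) := (Int.mul_ediv_cancel' hd.1).symm
        rw [this, hi]; ring
      · have : q = t * (q / t) := (Int.mul_ediv_cancel' hd.2).symm
        rw [this, hq']; ring
    · exact ⟨0, i, q, by rw [dipInner_stop hd]; norm_num, by ring, by ring, hd, fun h => absurd h hd⟩

theorem dipInner_decomp {i q c t : Int} (ht : 2 ≤ t) (hq : 1 ≤ q) :
    ∃ (m : Nat) (i' q' : Int), dipInner i q c t = (i', q', c * t ^ m) ∧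
      i = t ^ m * i' ∧ q = t ^ m * q' ∧ ¬ (t ∣ i' ∧ t ∣ q') ∧ (t ∣ i ∧ t ∣ q → 1 ≤ m) :=
  dipInner_decomp_aux q.natAbs i q c t ht hq le_rfl

theorem refLoop_stop {i q c t : Int} (h : q ≤ t) : refLoop i q c t = c := by
  rw [refLoop, if_neg (by omega)]

theorem refLoop_step {i q c t : Int} (ht : 2 ≤ t) (h : t < q) :
    refLoop i q c t =
      refLoop (dipInner i q c t).1 (dipInner i q c t).2.1 (dipInner i q c t).2.2 (t + 1) := by
  have hs := dipInner_spec (i := i) (q := q) (c := c) ht (by omega)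
  have hle : (dipInner i q c t).2.1 ≤ q := Int.le_of_dvd (by omega) hs.2.1
  rw [refLoop, if_pos h, dif_pos (by omega)]

-- ---- A's dct is the canonical self-generated candidate list ----
def noDiv (l : List Int) (v : Int) : Prop := ∀ d ∈ l, ¬ d ∣ v

def Good (l : List Int) : Prop :=
  (∀ (k : Nat) (h : k < l.length), 2 ≤ l[k]) ∧
  (List.Pairwise (· < ·) l) ∧
  (∀ (k : Nat) (h : k < l.length), ∀ s : Int, 2 ≤ s → s < l[k] →
      ∃ (j : Nat) (hj : j < l.length), j < k ∧ l[j] ∣ s)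

theorem foldl_mul_eq_prod : ∀ (l : List Int) (a : Int), l.foldl (· * ·) a = a * l.prod := by
  intro l
  induction l with
  | nil => intro a; simp
  | cons x xs ih => intro a; simp [ih, List.prod_cons, mul_assoc]

theorem Good.two_le_mem {l : List Int} (hG : Good l) {d : Int} (hd : d ∈ l) : 2 ≤ d := by
  rcases List.mem_iff_getElem.mp hd with ⟨j, hj, rfl⟩
  exact hG.1 j hj

theorem le_getLast_of_sorted {l : List Int} (hs : List.Pairwise (· < ·) l) (hne : l ≠ [])
    {x : Int} (hx : x ∈ l) : x ≤ l.getLast hne := by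
  rcases List.mem_iff_getElem.mp hx with ⟨j, hj, rfl⟩
  rw [List.getLast_eq_getElem]
  rcases Nat.lt_or_ge j (l.length - 1) with hlt | hge
  · exact le_of_lt ((List.pairwise_iff_getElem.mp hs) j (l.length - 1) (by omega) (by omega) hlt)
  · have : j = l.length - 1 := by omega
    subst this; exact le_rfl

theorem Good_init : Good [2, 3] := by
  refine ⟨?_, ?_, ?_⟩
  · intro k h
    simp only [List.length_cons, List.length_nil] at h
    interval_cases k <;> simp
  · decide
  · intro k h s h2 h3
    simp only [List.length_cons, List.length_nil] at h
    interval_cases k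
    · simp at h3; omega
    · refine ⟨0, by simp, by omega, ?_⟩
      have hs2 : s = 2 := by simp at h3; omega
      rw [hs2]; simp

theorem findV_spec {l : List Int} : ∀ (fuel : Nat) (v : Int),
    (∃ w, v < w ∧ w ≤ v + fuel ∧ noDiv l w) →
    v < findV l v fuel ∧ noDiv l (findV l v fuel) ∧
      ∀ u, v < u → u < findV l v fuel → ¬ noDiv l u := by
  intro fuel
  induction fuel with
  | zero =>
    intro v h
    rcases h with ⟨w, h1, h2, _⟩
    omega
  | succ f ih =>
    intro v h
    have hiff : (l.any (fun d => PySem.Int.mod (v + 1) d == 0) = true) ↔ ¬ noDiv l (v + 1) := by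
      simp only [List.any_eq_true, beq_iff_eq, PySem.Int.mod_eq_zero_iff_dvd, noDiv]
      push_neg
      tauto
    rw [findV]
    by_cases hA : l.any (fun d => PySem.Int.mod (v + 1) d == 0) = true
    · have hnd : ¬ noDiv l (v + 1) := hiff.mp hA
      simp only [hA, if_true]
      rcases h with ⟨w, hw1, hw2, hw3⟩
      have hwne : w ≠ v + 1 := fun he => hnd (he ▸ hw3)
      obtain ⟨hr1, hr2, hr3⟩ := ih (v + 1) ⟨w, by omega, by omega, hw3⟩
      refine ⟨by omega, hr2, ?_⟩
      intro u hu1 hu2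
      rcases eq_or_lt_of_le (by omega : v + 1 ≤ u) with he | hlt
      · rw [← he]; exact hnd
      · exact hr3 u hlt hu2
    · rw [if_neg hA]
      refine ⟨by omega, not_not.mp (fun hn => hA (hiff.mpr hn)), ?_⟩
      intro u hu1 hu2
      omega

theorem not_noDiv_iff {l : List Int} {s : Int} : ¬ noDiv l s ↔ ∃ d ∈ l, d ∣ s := by
  simp only [noDiv]
  push_neg
  tauto

theorem nextCand_spec {l : List Int} (hG : Good l) (hne : l ≠ []) :
    l.getLast hne < nextCand l ∧ Good (l ++ [nextCand l]) := by
  have hv : (PySem.List.pyGet? l (-1)).getD 0 = l.getLast hne := by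
    rw [PySem.List.pyGet?_neg_one, List.getLast?_eq_some_getLast hne, Option.getD_some]
  have hvmem : l.getLast hne ∈ l := List.getLast_mem hne
  have hv2 : 2 ≤ l.getLast hne := hG.two_le_mem hvmem
  have hPpos : 0 < l.prod := List.prod_pos (fun x hx => by have := hG.two_le_mem hx; omega)
  have hvP : l.getLast hne ≤ l.prod := Int.le_of_dvd hPpos (List.dvd_prod hvmem)
  have hfold : l.foldl (· * ·) 1 = l.prod := by rw [foldl_mul_eq_prod]; ring
  have hnd : noDiv l (l.prod + 1) := by
    intro d hd hdvd
    have h2 := hG.two_le_mem hd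
    have h1 : d ∣ l.prod := List.dvd_prod hd
    have h3 : d ∣ 1 := (dvd_add_right h1).mp hdvd
    have := Int.le_of_dvd one_pos h3
    omega
  have hN : nextCand l =
      findV l (l.getLast hne) ((l.foldl (· * ·) 1 + 1 - l.getLast hne).toNat) := by
    simp only [nextCand, hv]
  obtain ⟨hgt, hnd2, hmin⟩ := findV_spec ((l.foldl (· * ·) 1 + 1 - l.getLast hne).toNat)
    (l.getLast hne) ⟨l.prod + 1, by omega, by rw [hfold]; omega, hnd⟩
  rw [← hN] at hgt hnd2 hmin
  have hlen : 1 ≤ l.length := List.length_pos_iff.mpr hne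
  have hN2 : 2 ≤ nextCand l := by omega
  refine ⟨hgt, ?_, ?_, ?_⟩
  · -- all elements ≥ 2
    intro k h
    rcases Nat.lt_or_ge k l.length with hk | hk
    · rw [List.getElem_append_left hk]
      exact hG.1 k hk
    · have hkl : k = l.length := by simp [List.length_append] at h; omega
      subst hkl
      rw [List.getElem_append_right le_rfl]
      simpa using hN2
  · -- still strictly sorted
    refine List.pairwise_append.mpr ⟨hG.2.1, List.pairwise_singleton _ _, ?_⟩
    intro x hx y hy
    simp only [List.mem_singleton] at hy
    subst hy
    exact lt_of_le_of_lt (le_getLast_of_sorted hG.2.1 hne hx) hgt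
  · -- completeness
    intro k h s h2 h3
    have hlen2 : (l ++ [nextCand l]).length = l.length + 1 := by simp
    rcases Nat.lt_or_ge k l.length with hk | hk
    · rw [List.getElem_append_left hk] at h3
      obtain ⟨j, hj, hjk, hdvd⟩ := hG.2.2 k hk s h2 h3
      exact ⟨j, by omega, hjk, by rw [List.getElem_append_left hj]; exact hdvd⟩
    · have hkl : k = l.length := by omega
      subst hkl
      rw [List.getElem_append_right le_rfl] at h3
      simp only [Nat.sub_self, List.getElem_cons_zero] at h3
      rcases lt_trichotomy s (l.getLast hne) with hs | hs | hs
      · have hlast : l.getLast hne = l[l.length - 1] := List.getLast_eq_getElem hne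
        obtain ⟨j, hj, hjk, hdvd⟩ := hG.2.2 (l.length - 1) (by omega) s h2 (by rw [← hlast]; exact hs)
        exact ⟨j, by omega, by omega, by rw [List.getElem_append_left hj]; exact hdvd⟩
      · refine ⟨l.length - 1, by omega, by omega, ?_⟩
        rw [List.getElem_append_left (by omega), ← List.getLast_eq_getElem hne, hs]
      · obtain ⟨d, hd, hdvd⟩ := not_noDiv_iff.mp (hmin s hs h3)
        obtain ⟨j, hj, rfl⟩ := List.mem_iff_getElem.mp hd
        exact ⟨j, by omega, by omega, by rw [List.getElem_append_left hj]; exact hdvd⟩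

theorem growDct_spec : ∀ (n : Nat) (l : List Int), Good l → l ≠ [] → ∀ q : Int,
    (q + 1 - l.length).toNat ≤ n →
    Good (growDct l q) ∧ l <+: growDct l q ∧ q < (growDct l q).length := by
  intro n
  induction n with
  | zero =>
    intro l hG hne q hn
    rw [growDct, dif_neg (by omega)]
    exact ⟨hG, List.prefix_refl l, by omega⟩
  | succ n ih =>
    intro l hG hne q hn
    by_cases hq : (l.length : Int) ≤ q
    · rw [growDct, dif_pos hq]
      obtain ⟨h1, h2⟩ := nextCand_spec hG hne
      have hne' : l ++ [nextCand l] ≠ [] := by simp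
      obtain ⟨g1, g2, g3⟩ := ih (l ++ [nextCand l]) h2 hne' q (by simp [List.length_append]; omega)
      exact ⟨g1, (List.prefix_append l [nextCand l]).trans g2, g3⟩
    · rw [growDct, dif_neg hq]
      exact ⟨hG, List.prefix_refl l, by omega⟩

theorem vi_spec {l : List Int} (hG : Good l) (hne : l ≠ []) (p : Nat) :
    Good (vi l p).2 ∧ l <+: (vi l p).2 ∧ p < (vi l p).2.length ∧
      (∀ (h : p < (vi l p).2.length), (vi l p).1 = (vi l p).2[p]) := by
  obtain ⟨g1, g2, g3⟩ := growDct_spec ((p : Int) + 1 - l.length).toNat l hG hne p le_rfl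
  have hp : p < (growDct l p).length := by exact_mod_cast g3
  have hsnd : (vi l p).2 = growDct l p := rfl
  refine ⟨by rw [hsnd]; exact g1, by rw [hsnd]; exact g2, by rw [hsnd]; exact hp, ?_⟩
  intro h
  show (PySem.List.pyGet? (growDct l p) p).getD 0 = _
  rw [PySem.List.pyGet?_natCast, List.getElem?_eq_getElem hp, Option.getD_some]
  rfl

theorem dipOuter_stop {l : List Int} {i q c p t : Int} (h : q ≤ t) :
    dipOuter l i q c p t = c := by
  rw [dipOuter, if_neg (by omega)]

theorem dipOuter_step {l : List Int} {i q c p t : Int} (h : t < q)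
    (hg : ((dipInner i q c t).2.1 - (vi l (p + 1)).1).toNat < (q - t).toNat) :
    dipOuter l i q c p t =
      dipOuter (vi l (p + 1)).2 (dipInner i q c t).1 (dipInner i q c t).2.1
        (dipInner i q c t).2.2 (p + 1) (vi l (p + 1)).1 := by
  rw [dipOuter, if_pos h, dif_pos hg]

-- skipping candidates that divide neither side
theorem refSkip : ∀ (n : Nat) (a b i q c : Int), 2 ≤ a → a ≤ b → (b - a).toNat ≤ n →
    (∀ s, a ≤ s → s < b → ¬ (s ∣ i ∧ s ∣ q)) → refLoop i q c a = refLoop i q c b := by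
  intro n
  induction n with
  | zero =>
    intro a b i q c h2 hab hn hs
    have : a = b := by omega
    rw [this]
  | succ n ih =>
    intro a b i q c h2 hab hn hs
    rcases eq_or_lt_of_le hab with he | hlt
    · rw [he]
    · by_cases hq : a < q
      · have hnd : ¬ (a ∣ i ∧ a ∣ q) := hs a le_rfl hlt
        rw [refLoop_step h2 hq, dipInner_stop hnd]
        exact ih (a + 1) b i q c (by omega) (by omega) (by omega)
          (fun s h1 h2' => hs s (by omega) h2')
      · rw [refLoop_stop (by omega), refLoop_stop (by omega)]

-- A's outer loop over the dct candidates equals the loop over all candidates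
theorem A_main : ∀ (n : Nat) (i q c : Int) (p : Nat) (l : List Int) (hG : Good l)
    (hp : p < l.length), (q - l[p]).toNat ≤ n →
    (∀ (j : Nat) (hj : j < l.length), j < p → ¬ (l[j] ∣ i ∧ l[j] ∣ q)) →
    dipOuter l i q c p l[p] = refLoop i q c l[p] := by
  intro n
  induction n with
  | zero =>
    intro i q c p l hG hp hn hInv
    have ht2 : 2 ≤ l[p] := hG.1 p hp
    rw [dipOuter_stop (by omega), refLoop_stop (by omega)]
  | succ n ih =>
    intro i q c p l hG hp hn hInv
    have ht2 : 2 ≤ l[p] := hG.1 p hp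
    by_cases hlt : l[p] < q
    · have hne : l ≠ [] := List.ne_nil_of_length_pos (by omega)
      have hq1 : (1:Int) ≤ q := by omega
      have hs := dipInner_spec (i := i) (q := q) (c := c) ht2 hq1
      have hrq : (dipInner i q c l[p]).2.1 ≤ q := Int.le_of_dvd (by omega) hs.2.1
      obtain ⟨G1, G2, G3, G4⟩ := vi_spec hG hne (p + 1)
      have hcast : (p : Int) + 1 = ((p + 1 : Nat) : Int) := by push_cast; ring
      have hlen : l.length ≤ (vi l ((p:Nat) + 1 : Nat)).2.length := G2.length_le
      have hpre : ∀ (j : Nat) (hj : j < l.length),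
          (vi l ((p:Nat) + 1 : Nat)).2[j]'(by omega) = l[j] :=
        fun j hj => (List.IsPrefix.getElem G2 hj).symm
      have ht'eq : (vi l ((p:Nat) + 1 : Nat)).1 = (vi l ((p:Nat) + 1 : Nat)).2[p + 1] := G4 G3
      have htl : (vi l ((p:Nat) + 1 : Nat)).2[p]'(by omega) = l[p] := hpre p hp
      have htt' : l[p] < (vi l ((p:Nat) + 1 : Nat)).1 := by
        rw [ht'eq, ← htl]
        exact (List.pairwise_iff_getElem.mp G1.2.1) p (p + 1) (by omega) G3 (by omega)
      have hg : ((dipInner i q c l[p]).2.1 - (vi l ((p : Int) + 1)).1).toNat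
          < (q - l[p]).toNat := by rw [hcast]; omega
      rw [dipOuter_step hlt hg]
      rw [hcast]
      have hInv' : ∀ (j : Nat) (hj : j < (vi l ((p:Nat) + 1 : Nat)).2.length), j < p + 1 →
          ¬ ((vi l ((p:Nat) + 1 : Nat)).2[j] ∣ (dipInner i q c l[p]).1 ∧
             (vi l ((p:Nat) + 1 : Nat)).2[j] ∣ (dipInner i q c l[p]).2.1) := by
        intro j hj hjp hd
        rcases Nat.lt_or_ge j p with hjp' | hjp'
        · have hjl : j < l.length := by omega
          rw [hpre j hjl] at hd
          exact hInv j hjl hjp' ⟨dvd_trans hd.1 hs.1, dvd_trans hd.2 hs.2.1⟩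
        · have : j = p := by omega
          subst this
          rw [htl] at hd
          exact hs.2.2.2 hd
      have hrec := ih (dipInner i q c l[p]).1 (dipInner i q c l[p]).2.1
        (dipInner i q c l[p]).2.2 (p + 1) (vi l ((p:Nat) + 1 : Nat)).2 G1 G3
        (by rw [← ht'eq]; omega) hInv'
      rw [← ht'eq] at hrec
      rw [hrec]
      have hskip : refLoop (dipInner i q c l[p]).1 (dipInner i q c l[p]).2.1
          (dipInner i q c l[p]).2.2 (l[p] + 1)
          = refLoop (dipInner i q c l[p]).1 (dipInner i q c l[p]).2.1
            (dipInner i q c l[p]).2.2 (vi l ((p:Nat) + 1 : Nat)).1 := by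
        refine refSkip ((vi l ((p:Nat) + 1 : Nat)).1 - (l[p] + 1)).toNat (l[p] + 1)
          (vi l ((p:Nat) + 1 : Nat)).1 _ _ _ (by omega) (by omega) le_rfl ?_
        intro w hw1 hw2 hwd
        rw [ht'eq] at hw2
        obtain ⟨j, hj, hjk, hdvd⟩ := G1.2.2 (p + 1) G3 w (by omega) hw2
        exact hInv' j hj hjk ⟨dvd_trans hdvd hwd.1, dvd_trans hdvd hwd.2⟩
      rw [← hskip, ← refLoop_step ht2 hlt]
    · rw [dipOuter_stop (by omega), refLoop_stop (by omega)]

theorem dip_eq_ref (q i : Int) : dip q i = PySem.Int.floordiv i (refLoop i q 1 2) := by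
  have hgrow : growDct [2, 3] 0 = [2, 3] := by
    rw [growDct, dif_neg (by norm_num)]
  have hvi : vi [2, 3] 0 = (2, [2, 3]) := by
    simp only [vi, hgrow]
    rw [PySem.List.pyGet?_zero]
    rfl
  have hmain := A_main (q - 2).toNat i q 1 0 [2, 3] Good_init (by norm_num) (by simp)
    (by intro j hj hjp; omega)
  have hmain' : dipOuter [2, 3] i q 1 0 2 = refLoop i q 1 2 := by simpa using hmain
  simp only [dip, hvi, hmain']

-- ---- B's Euclidean loop computes the gcd ----
theorem euclid_gcd : ∀ (n : Nat) (g r : Int), 0 ≤ g → 0 ≤ r → r.toNat ≤ n →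
    euclid g r = Int.gcd g r := by
  intro n
  induction n with
  | zero =>
    intro g r hg hr hn
    have : r = 0 := by omega
    subst this
    rw [euclid, dif_neg (by omega)]
    rw [Int.gcd_zero_right]
    exact (Int.natAbs_of_nonneg hg).symm
  | succ n ih =>
    intro g r hg hr hn
    by_cases hr0 : 0 < r
    · have hm1 : 0 ≤ g % r := Int.emod_nonneg g (by omega)
      have hm2 : g % r < r := Int.emod_lt_of_pos g hr0
      rw [euclid, dif_pos hr0, PySem.Int.mod_eq_emod_of_pos hr0]
      rw [ih r (g % r) (by omega) hm1 (by omega)]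
      congr 1
      rw [Int.gcd_comm]
      exact Int.gcd_emod g r
    · have : r = 0 := by omega
      subst this
      rw [euclid, dif_neg (by omega), Int.gcd_zero_right]
      exact (Int.natAbs_of_nonneg hg).symm

-- ---- largest-prime-factor facts ----
theorem sqrt_stop {n k d : Nat} (hk : 2 ≤ k) (hn : 2 ≤ n) (hlt : n < k * k)
    (hsmall : ∀ e, 2 ≤ e → e < k → ¬ e ∣ n) (hd2 : 2 ≤ d) (hdn : d ∣ n) : n ≤ d := by
  by_cases hdk : d < k
  · exact absurd hdn (hsmall d hd2 hdk)
  · push_neg at hdk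
    obtain ⟨e, he⟩ := hdn
    have he1 : 1 ≤ e := by
      rcases Nat.eq_zero_or_pos e with h0 | h0
      · rw [h0, mul_zero] at he; omega
      · exact h0
    rcases Nat.lt_or_ge e 2 with h1 | h1
    · have : e = 1 := by omega
      rw [this, mul_one] at he; omega
    · exfalso
      have hx : k * e ≤ d * e := Nat.mul_le_mul_right e hdk
      have h2 : d * e < k * k := by rw [← he]; exact hlt
      have hek : e < k := Nat.lt_of_mul_lt_mul_left (Nat.lt_of_le_of_lt hx h2)
      exact hsmall e h1 hek ⟨d, by rw [he]; ring⟩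

theorem smallFac_spec : ∀ (fuel k n : Nat), 2 ≤ k → 2 ≤ n → n ≤ k + fuel →
    (∀ d, 2 ≤ d → d < k → ¬ d ∣ n) →
    smallFac n k fuel ∣ n ∧ 2 ≤ smallFac n k fuel ∧
      ∀ d, 2 ≤ d → d ∣ n → smallFac n k fuel ≤ d := by
  intro fuel
  induction fuel with
  | zero =>
    intro k n hk hn hfuel hsmall
    rw [smallFac]
    split_ifs with hlt
    · exact ⟨dvd_refl n, hn, fun d hd2 hdn => sqrt_stop hk hn hlt hsmall hd2 hdn⟩
    · -- k * k ≤ n ≤ k : impossible with 2 ≤ k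
      push_neg at hlt
      exfalso; nlinarith
  | succ f ih =>
    intro k n hk hn hfuel hsmall
    rw [smallFac]
    split_ifs with hlt hmod
    · exact ⟨dvd_refl n, hn, fun d hd2 hdn => sqrt_stop hk hn hlt hsmall hd2 hdn⟩
    · refine ⟨Nat.dvd_of_mod_eq_zero hmod, hk, ?_⟩
      intro d hd2 hdn
      by_cases hdk : d < k
      · exact absurd hdn (hsmall d hd2 hdk)
      · omega
    · refine ih (k + 1) n (by omega) hn (by omega) ?_
      intro d hd2 hdk
      rcases Nat.lt_or_ge d k with h1 | h1
      · exact hsmall d hd2 h1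
      · have : d = k := by omega
        subst this
        intro hdvd
        exact hmod (Nat.dvd_iff_mod_eq_zero.mp hdvd)

theorem lpfAux_small {n fuel : Nat} (h : n < 2) : lpfAux n fuel = 0 := by
  cases fuel with
  | zero => rfl
  | succ f => rw [lpfAux, if_pos h]

theorem lpfAux_spec : ∀ (fuel n : Nat), 2 ≤ n → n ≤ fuel →
    (lpfAux n fuel).Prime ∧ lpfAux n fuel ∣ n ∧
      ∀ r, r.Prime → r ∣ n → r ≤ lpfAux n fuel := by
  intro fuel
  induction fuel with
  | zero => intro n hn hfuel; omega
  | succ f ih =>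
    intro n hn hfuel
    obtain ⟨hpd, hp2, hpmin⟩ :=
      smallFac_spec n 2 n le_rfl hn (by omega) (by intro d hd2 hdk; omega)
    set p := smallFac n 2 n with hp
    have hpp : p.Prime := by
      obtain ⟨r, hrp, hrd⟩ := Nat.exists_prime_and_dvd (show p ≠ 1 by omega)
      have hrn : r ∣ n := hrd.trans hpd
      have h1 : p ≤ r := hpmin r hrp.two_le hrn
      have h2 : r ≤ p := Nat.le_of_dvd (by omega) hrd
      have : r = p := le_antisymm h2 h1
      rwa [← this]
    rw [lpfAux, if_neg (by omega), ← hp]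
    have hmn : n / p * p = n := Nat.div_mul_cancel hpd
    have hmdvd : n / p ∣ n := ⟨p, hmn.symm⟩
    by_cases hm2 : 2 ≤ n / p
    · have hmf : n / p ≤ f := by
        have h1 : n / p ≤ n / 2 := Nat.div_le_div_left hp2 (by omega)
        have h2 : n / 2 < n := Nat.div_lt_self (by omega) (by omega)
        omega
      obtain ⟨hLp, hLd, hLmax⟩ := ih (n / p) hm2 hmf
      refine ⟨?_, ?_, ?_⟩
      · rcases le_total (lpfAux (n / p) f) p with h | h
        · rwa [max_eq_left h]
        · rwa [max_eq_right h]
      · rcases le_total (lpfAux (n / p) f) p with h | h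
        · rw [max_eq_left h]; exact hpd
        · rw [max_eq_right h]; exact hLd.trans hmdvd
      · intro r hr hrn
        have : r ∣ (n / p) * p := by rwa [hmn]
        rcases (Nat.Prime.dvd_mul hr).mp this with h | h
        · exact le_trans (hLmax r hr h) (le_max_right _ _)
        · have : r = p := (Nat.prime_dvd_prime_iff_eq hr hpp).mp h
          rw [this]; exact le_max_left _ _
    · have hm1 : n / p = 1 := by
        have : 1 ≤ n / p := Nat.one_le_div_iff (by omega) |>.mpr (Nat.le_of_dvd (by omega) hpd)
        omega
      have hnp : n = p := by rw [← hmn, hm1, one_mul]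
      rw [hm1, lpfAux_small (by omega), max_eq_left (by omega)]
      refine ⟨hpp, hnp ▸ dvd_refl p, ?_⟩
      intro r hr hrn
      rw [hnp] at hrn
      exact ((Nat.prime_dvd_prime_iff_eq hr hpp).mp hrn).le

theorem lpf_spec {n : Nat} (hn : 2 ≤ n) :
    (lpf n).Prime ∧ lpf n ∣ n ∧ ∀ r, r.Prime → r ∣ n → r ≤ lpf n :=
  lpfAux_spec n n hn le_rfl

theorem lpf_eq {n p : Nat} (hn : 2 ≤ n) (hp : p.Prime) (hd : p ∣ n)
    (hmax : ∀ r, r.Prime → r ∣ n → r ≤ p) : lpf n = p :=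
  le_antisymm (hmax _ (lpf_spec hn).1 (lpf_spec hn).2.1) ((lpf_spec hn).2.2 p hp hd)

theorem lpf_pow {t m : Nat} (ht : t.Prime) (hm : 1 ≤ m) : lpf (t ^ m) = t := by
  have h2 : 2 ≤ t := ht.two_le
  refine lpf_eq ?_ ht (dvd_pow_self t (by omega)) ?_
  · calc 2 ≤ t := h2
      _ = t ^ 1 := (pow_one t).symm
      _ ≤ t ^ m := Nat.pow_le_pow_right (by omega) hm
  · intro r hr hrd
    have : r ∣ t := hr.dvd_of_dvd_pow hrd
    exact ((Nat.prime_dvd_prime_iff_eq hr ht).mp this).le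

theorem lpf_mul_pow {t m n : Nat} (ht : t.Prime) (hm : 1 ≤ m) (hn : 2 ≤ n)
    (hpr : ∀ r, r.Prime → r ∣ n → t < r) : lpf (t ^ m * n) = lpf n := by
  have htm : 0 < t ^ m := Nat.pow_pos (by have := ht.two_le; omega)
  have hL := lpf_spec hn
  refine lpf_eq ?_ hL.1 (hL.2.1.trans (dvd_mul_left n (t ^ m))) ?_
  · calc 2 ≤ n := hn
      _ ≤ t ^ m * n := Nat.le_mul_of_pos_left n htm
  · intro r hr hrd
    rcases (Nat.Prime.dvd_mul hr).mp hrd with h | h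
    · have hrt : r ∣ t := hr.dvd_of_dvd_pow h
      have : r = t := (Nat.prime_dvd_prime_iff_eq hr ht).mp hrt
      rw [this]
      exact (hpr (lpf n) hL.1 hL.2.1).le
    · exact hL.2.2 r hr h

theorem sq_lpf_mul_pow {t m n : Nat} (ht : t.Prime) (hm : 1 ≤ m) (hn : 2 ≤ n)
    (hpr : ∀ r, r.Prime → r ∣ n → t < r) :
    (lpf (t ^ m * n) * lpf (t ^ m * n) ∣ t ^ m * n) ↔ (lpf n * lpf n ∣ n) := by
  rw [lpf_mul_pow ht hm hn hpr]
  have hL := lpf_spec hn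
  have hPt : lpf n ≠ t := by
    have := hpr (lpf n) hL.1 hL.2.1
    omega
  have hcop : Nat.Coprime (lpf n * lpf n) (t ^ m) :=
    (Nat.Coprime.mul ((Nat.coprime_primes hL.1 ht).mpr hPt)
      ((Nat.coprime_primes hL.1 ht).mpr hPt)).pow_right m
  constructor
  · intro h
    exact (Nat.Coprime.dvd_of_dvd_mul_left hcop) h
  · intro h
    exact h.trans (dvd_mul_left n (t ^ m))

-- Int ↔ Nat bridges
theorem int_sq_dvd_iff {q : Int} (hq : 0 ≤ q) (a : Nat) :
    ((a : Int) * (a : Int) ∣ q) ↔ (a * a ∣ q.toNat) := by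
  conv_lhs => rw [← Int.toNat_of_nonneg hq]
  rw [show ((a : Int) * (a : Int)) = ((a * a : Nat) : Int) by push_cast; ring]
  exact Int.natCast_dvd_natCast

theorem int_dvd_iff {q : Int} (hq : 0 ≤ q) (a : Nat) :
    ((a : Int) ∣ q) ↔ (a ∣ q.toNat) := by
  conv_lhs => rw [← Int.toNat_of_nonneg hq]
  exact Int.natCast_dvd_natCast

-- the key decomposition step for rhsDiv
theorem rhsDiv_decomp {t : Int} {m : Nat} {i' q' i q : Int}
    (htp : t.toNat.Prime) (ht : 2 ≤ t) (hm : 1 ≤ m) (hq'pos : 0 < q')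
    (hi : i = t ^ m * i') (hq : q = t ^ m * q') (hnd : ¬ (t ∣ i' ∧ t ∣ q'))
    (hbig : ∀ s : Int, 2 ≤ s → s < t → ¬ (s ∣ i ∧ s ∣ q)) (hlt : t < q) :
    rhsDiv q i = t ^ m * rhsDiv q' i' := by
  have ht0 : (0:Int) < t := by omega
  have htn : (t.toNat : Int) = t := Int.toNat_of_nonneg (by omega)
  have htmpos : (0:Int) < t ^ m := pow_pos ht0 m
  have hqpos : 0 < q := by omega
  have hgcd : (Int.gcd i q : Int) = t ^ m * (Int.gcd i' q' : Int) := by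
    rw [hi, hq, Int.gcd_mul_left]
    push_cast
    rw [abs_of_pos htmpos]
  have hdvd_iff : q ∣ i ↔ q' ∣ i' := by
    rw [hi, hq]
    exact mul_dvd_mul_iff_left (by omega : (t:Int) ^ m ≠ 0)
  by_cases hq1 : q' = 1
  · -- q = t^m with m ≥ 2; the square of lpf q divides q, so the first branch is off
    subst hq1
    have hqtm : q = t ^ m := by rw [hq]; ring
    have hm2 : 2 ≤ m := by
      by_contra h
      have : m = 1 := by omega
      rw [this, pow_one] at hqtm
      omega
    have hqnat : q.toNat = t.toNat ^ m := by
      have : ((t.toNat ^ m : Nat) : Int) = q := by push_cast [htn]; omega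
      omega
    have hlpf : lpf q.toNat = t.toNat := by rw [hqnat]; exact lpf_pow htp (by omega)
    have hsq : (lpf q.toNat : Int) * (lpf q.toNat : Int) ∣ q := by
      rw [hlpf, htn, hqtm]
      have : t * t = t ^ 2 := by ring
      rw [this]
      exact pow_dvd_pow t hm2
    have h1 : rhsDiv q i = (Int.gcd i q : Int) := by
      unfold rhsDiv
      rw [if_neg (by tauto)]
    have h2 : rhsDiv 1 i' = (Int.gcd i' 1 : Int) := by
      unfold rhsDiv
      rw [if_neg (by intro h; exact absurd h.1 (by norm_num))]
    rw [h1, h2, hgcd]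
  · have hq'2 : 2 ≤ q' := by omega
    by_cases hqi : q ∣ i
    · have hq'i' : q' ∣ i' := hdvd_iff.mp hqi
      -- every prime factor of q' exceeds t
      have hbigN : ∀ r : Nat, r.Prime → r ∣ q'.toNat → t.toNat < r := by
        intro r hr hrd
        have hrq' : (r : Int) ∣ q' := (int_dvd_iff (by omega) r).mpr hrd
        have hrq : (r : Int) ∣ q := hrq'.trans ⟨t ^ m, by rw [hq]; ring⟩
        have hri : (r : Int) ∣ i := hrq.trans hqi
        have hr2 : (2:Int) ≤ (r : Int) := by exact_mod_cast hr.two_le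
        have hrget : ¬ ((r:Int) < t) := fun h => hbig r hr2 h ⟨hri, hrq⟩
        have hrne : (r : Int) ≠ t := by
          intro h
          have hti' : t ∣ i' := (h ▸ hrq' : t ∣ q').trans hq'i'
          exact hnd ⟨hti', h ▸ hrq'⟩
        have : t < (r : Int) := by omega
        omega
      have hqnat : q.toNat = t.toNat ^ m * q'.toNat := by
        have : ((t.toNat ^ m * q'.toNat : Nat) : Int) = q := by
          push_cast [htn, Int.toNat_of_nonneg (by omega : (0:Int) ≤ q')]
          omega
        omega
      have hq'nat2 : 2 ≤ q'.toNat := by omega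
      have hlpf : lpf q.toNat = lpf q'.toNat := by
        rw [hqnat]; exact lpf_mul_pow htp hm hq'nat2 hbigN
      have hsq_iff : ((lpf q.toNat : Int) * (lpf q.toNat : Int) ∣ q) ↔
          ((lpf q'.toNat : Int) * (lpf q'.toNat : Int) ∣ q') := by
        rw [int_sq_dvd_iff (by omega) _, int_sq_dvd_iff (by omega : (0:Int) ≤ q') _, hqnat]
        exact sq_lpf_mul_pow htp hm hq'nat2 hbigN
      by_cases hS : (lpf q'.toNat : Int) * (lpf q'.toNat : Int) ∣ q'
      · -- neither branch takes the lpf division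
        have h1 : rhsDiv q i = (Int.gcd i q : Int) := by
          unfold rhsDiv
          rw [if_neg (by intro h; exact h.2.2 (hsq_iff.mpr hS))]
        have h2 : rhsDiv q' i' = (Int.gcd i' q' : Int) := by
          unfold rhsDiv
          rw [if_neg (by intro h; exact h.2.2 hS)]
        rw [h1, h2, hgcd]
      · -- both take the lpf division
        have hP := lpf_spec hq'nat2
        have hPd : (lpf q'.toNat : Int) ∣ q' := (int_dvd_iff (by omega) _).mpr hP.2.1
        have h1 : rhsDiv q i = q / (lpf q.toNat : Int) := by
          unfold rhsDiv
          rw [if_pos ⟨by omega, hqi, fun h => hS (hsq_iff.mp h)⟩]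
        have h2 : rhsDiv q' i' = q' / (lpf q'.toNat : Int) := by
          unfold rhsDiv
          rw [if_pos ⟨by omega, hq'i', hS⟩]
        rw [h1, h2, hlpf, hq, Int.mul_ediv_assoc _ hPd]
    · -- no q ∣ i on either side: gcd on both
      have h1 : rhsDiv q i = (Int.gcd i q : Int) := by
        unfold rhsDiv
        rw [if_neg (by intro h; exact hqi h.2.1)]
      have h2 : rhsDiv q' i' = (Int.gcd i' q' : Int) := by
        unfold rhsDiv
        rw [if_neg (by intro h; exact (hdvd_iff.not.mp hqi) h.2.1)]
      rw [h1, h2, hgcd]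

-- when the loop has exhausted all candidates below q, the divisor is fully determined
theorem rhsDiv_base {i q c t : Int} (ht : 2 ≤ t) (hq : 0 < q) (hqt : q ≤ t)
    (hInv : ∀ s, 2 ≤ s → s < t → ¬ (s ∣ i ∧ s ∣ q)) :
    refLoop i q c t = c * rhsDiv q i := by
  rw [refLoop_stop hqt]
  suffices h : rhsDiv q i = 1 by rw [h, mul_one]
  have hqn : (q.toNat : Int) = q := Int.toNat_of_nonneg (by omega)
  unfold rhsDiv
  split_ifs with hS
  · -- q is prime: q / lpf q = 1
    obtain ⟨hq2, hqi, hsq⟩ := hS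
    have hq2n : 2 ≤ q.toNat := by omega
    have hprim : ∀ r : Nat, r.Prime → r ∣ q.toNat → r = q.toNat := by
      intro r hr hrd
      have hrq : (r : Int) ∣ q := (int_dvd_iff (by omega) r).mpr hrd
      have hri : (r : Int) ∣ i := hrq.trans hqi
      have hr2 : (2:Int) ≤ (r : Int) := by exact_mod_cast hr.two_le
      have hrle : (r : Int) ≤ q := Int.le_of_dvd hq hrq
      have : ¬ ((r:Int) < q) := fun h => hInv r hr2 (by omega) ⟨hri, hrq⟩
      omega
    obtain ⟨r, hrp, hrd⟩ := Nat.exists_prime_and_dvd (show q.toNat ≠ 1 by omega)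
    have hrq : r = q.toNat := hprim r hrp hrd
    have hqprime : q.toNat.Prime := hrq ▸ hrp
    have hlpf : lpf q.toNat = q.toNat :=
      lpf_eq hq2n hqprime (dvd_refl _) (fun r' hr' hd' => (hprim r' hr' hd').le)
    rw [hlpf, hqn]
    exact Int.ediv_self (by omega)
  · -- gcd i q = 1
    have hgpos : 0 < Int.gcd i q := Int.gcd_pos_of_ne_zero_right i (by omega)
    by_contra hne
    have hg1 : Int.gcd i q ≠ 1 := fun h => hne (by rw [h]; norm_num)
    obtain ⟨r, hrp, hrd⟩ := Nat.exists_prime_and_dvd hg1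
    have hri : (r : Int) ∣ i :=
      (Int.natCast_dvd_natCast.mpr hrd).trans (Int.gcd_dvd_left i q)
    have hrq : (r : Int) ∣ q :=
      (Int.natCast_dvd_natCast.mpr hrd).trans (Int.gcd_dvd_right i q)
    have hr2 : (2:Int) ≤ (r : Int) := by exact_mod_cast hrp.two_le
    have hrle : (r : Int) ≤ q := Int.le_of_dvd hq hrq
    rcases eq_or_lt_of_le hrle with he | hl
    · -- r = q: q is prime, q ∣ i, and lpf q = q with square not dividing — contradiction
      apply hS
      have hqn2 : q.toNat = r := by omega
      have hqprime : q.toNat.Prime := hqn2 ▸ hrp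
      have hlpf : lpf q.toNat = q.toNat :=
        lpf_eq (by omega) hqprime (dvd_refl _) (fun r' _ hd' => Nat.le_of_dvd (by omega) hd')
      refine ⟨by omega, he ▸ hri, ?_⟩
      rw [hlpf, hqn]
      intro hdd
      have hle := Int.le_of_dvd hq hdd
      nlinarith
    · exact hInv r hr2 (by omega) ⟨hri, hrq⟩

-- the main characterisation of the reference loop
theorem refLoop_char : ∀ (n : Nat) (i q c t : Int), 2 ≤ t → 0 < q → (q - t).toNat ≤ n →
    (∀ s, 2 ≤ s → s < t → ¬ (s ∣ i ∧ s ∣ q)) →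
    refLoop i q c t = c * rhsDiv q i := by
  intro n
  induction n with
  | zero =>
    intro i q c t ht hq hn hInv
    exact rhsDiv_base ht hq (by omega) hInv
  | succ n ih =>
    intro i q c t ht hq hn hInv
    by_cases hlt : t < q
    · have ht0 : (0:Int) < t := by omega
      by_cases hd : t ∣ i ∧ t ∣ q
      · -- t is the least prime dividing both; divide it out completely
        have htn2 : 2 ≤ t.toNat := by omega
        have htnc : (t.toNat : Int) = t := Int.toNat_of_nonneg (by omega)
        have htp : t.toNat.Prime := by
          set k := t.toNat.minFac with hkdef
          have h1 : t.toNat ≠ 1 := by omega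
          have hkp : k.Prime := Nat.minFac_prime h1
          have hkd : k ∣ t.toNat := Nat.minFac_dvd _
          have hkdI : (k : Int) ∣ t := by
            rw [← htnc]; exact_mod_cast hkd
          have hk2 : (2:Int) ≤ (k : Int) := by exact_mod_cast hkp.two_le
          have hkle : (k : Int) ≤ t := Int.le_of_dvd ht0 hkdI
          have hknlt : ¬ ((k:Int) < t) :=
            fun h => hInv k hk2 h ⟨hkdI.trans hd.1, hkdI.trans hd.2⟩
          have hke : k = t.toNat := by omega
          rw [← hke]; exact hkp
        obtain ⟨m, i', q', hEq, hi, hq', hnd, hm1⟩ :=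
          dipInner_decomp (i := i) (q := q) (c := c) (t := t) ht (by omega)
        have hm : 1 ≤ m := hm1 hd
        have htmpos : (0:Int) < t ^ m := pow_pos ht0 m
        have hq'pos : 0 < q' := by
          by_contra h
          push_neg at h
          have := mul_nonpos_of_nonneg_of_nonpos (le_of_lt htmpos) h
          rw [← hq'] at this
          omega
        have h1m : (1:Int) ≤ t ^ m := by omega
        have hq'le : q' ≤ q := by
          calc q' = 1 * q' := (one_mul q').symm
            _ ≤ t ^ m * q' := mul_le_mul_of_nonneg_right h1m (le_of_lt hq'pos)
            _ = q := hq'.symm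
        rw [refLoop_step ht hlt, hEq]
        simp only
        have hInv' : ∀ s, 2 ≤ s → s < t + 1 → ¬ (s ∣ i' ∧ s ∣ q') := by
          intro s h2 hlt' hss
          rcases eq_or_lt_of_le (by omega : s ≤ t) with he | hl
          · exact hnd (he ▸ hss)
          · exact hInv s h2 hl ⟨by rw [hi]; exact hss.1.mul_left (t ^ m),
              by rw [hq']; exact hss.2.mul_left (t ^ m)⟩
        rw [ih i' q' (c * t ^ m) (t + 1) (by omega) hq'pos (by omega) hInv']
        rw [rhsDiv_decomp htp ht hm hq'pos hi hq' hnd hInv hlt]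
        ring
      · rw [refLoop_step ht hlt, dipInner_stop hd]
        simp only
        refine ih i q c (t + 1) (by omega) hq (by omega) ?_
        intro s h2 hlt' hss
        rcases eq_or_lt_of_le (by omega : s ≤ t) with he | hl
        · exact hd (he ▸ hss)
        · exact hInv s h2 hl hss
    · exact rhsDiv_base ht hq (by omega) hInv

theorem dip_char {q i : Int} (hq : 0 < q) :
    dip q i = PySem.Int.floordiv i (rhsDiv q i) := by
  rw [dip_eq_ref]
  congr 1
  have := refLoop_char (q - 2).toNat i q 1 2 le_rfl hq le_rfl
    (by intro s h1 h2; exact absurd h2 (by omega))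
  rw [this, one_mul]

theorem dip_alt_char {q i : Int} (hq : 2 ≤ q) :
    dip_alt q i = PySem.Int.floordiv i (Int.gcd i q) := by
  unfold dip_alt
  rw [if_neg (by omega)]
  have h0 : 0 ≤ (if 0 ≤ i then i else -i) := by split_ifs with h <;> omega
  have := euclid_gcd q.toNat (if 0 ≤ i then i else -i) q h0 (by omega) le_rfl
  simp only [this]
  congr 2
  split_ifs with h
  · rfl
  · simp [Int.gcd]

theorem rhsDiv_pos {q i : Int} (hq : 0 < q) : 0 < rhsDiv q i := by
  unfold rhsDiv
  split_ifs with hS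
  · obtain ⟨hq2, _, _⟩ := hS
    have hP := lpf_spec (show 2 ≤ q.toNat by omega)
    set P : Int := (lpf q.toNat : Int) with hPdef
    have hPd : P ∣ q := (int_dvd_iff (by omega) _).mpr hP.2.1
    obtain ⟨u, hu⟩ := hPd
    have hP2 : (2:Int) ≤ P := by rw [hPdef]; exact_mod_cast hP.1.two_le
    have hupos : 0 < u := by nlinarith
    rw [hu, Int.mul_ediv_cancel_left u (by omega)]
    exact hupos
  · have := Int.gcd_pos_of_ne_zero_right i (show q ≠ 0 by omega)
    exact_mod_cast this

-- ===== VERDICT (by name: the statements are the Claim_ definitions above) =====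
theorem dip_spec : Claim_unchanged_dip := by
  intro q i _
  unfold Spec_dip
  intro hnD
  by_cases hq : q ≤ 1
  · have h1 : dip_alt q i = i := by unfold dip_alt; rw [if_pos hq]
    have h2 : dip q i = i := by
      rw [dip_eq_ref, refLoop_stop (by omega : q ≤ 2),
        PySem.Int.floordiv_eq_ediv_of_pos one_pos, Int.ediv_one]
    rw [h1, h2]
  · push_neg at hq
    have hq2 : 2 ≤ q := by omega
    rw [dip_char (by omega), dip_alt_char hq2]
    by_cases hS : 2 ≤ q ∧ q ∣ i ∧ ¬ ((lpf q.toNat : Int) * (lpf q.toNat : Int) ∣ q)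
    · -- avoided the difference region only by i = 0: both results are 0
      have hi0 : i = 0 := by
        by_contra hi0
        exact hnD ⟨hS.1, hS.2.1, hi0, hS.2.2⟩
      subst hi0
      have h1 : 0 < rhsDiv q 0 := rhsDiv_pos (by omega)
      have h2 : 0 < (Int.gcd 0 q : Int) := by
        have := Int.gcd_pos_of_ne_zero_right 0 (show q ≠ 0 by omega)
        exact_mod_cast this
      rw [PySem.Int.floordiv_eq_ediv_of_pos h1, PySem.Int.floordiv_eq_ediv_of_pos h2,
        Int.zero_ediv, Int.zero_ediv]
    · unfold rhsDiv
      rw [if_neg hS]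

theorem dip_changed : Claim_changed_dip := by
  unfold Claim_changed_dip
  refine ⟨by decide, by decide, ?_, ?_, by decide⟩
  · show dip 6 6 = 3
    rw [dip_char (by norm_num)]
    decide
  · show dip_alt 6 6 = 1
    rw [dip_alt_char (by norm_num)]
    decide

theorem dip_tight : Claim_exact_dip := by
  intro q i _ hD
  obtain ⟨hq2, hqi, hi0, hsq⟩ := hD
  have hqpos : (0:Int) < q := by omega
  have hP := lpf_spec (show 2 ≤ q.toNat by omega)
  set P : Int := (lpf q.toNat : Int) with hPdef
  have hP2 : (2:Int) ≤ P := by rw [hPdef]; exact_mod_cast hP.1.two_le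
  have hPd : P ∣ q := (int_dvd_iff (by omega) _).mpr hP.2.1
  obtain ⟨u, hu⟩ := hPd
  have hupos : 0 < u := by nlinarith
  obtain ⟨k, hk⟩ := hqi
  have hk0 : k ≠ 0 := by
    intro h
    rw [h, mul_zero] at hk
    exact hi0 hk
  rw [dip_char hqpos, dip_alt_char hq2]
  have hrw : rhsDiv q i = q / P := by
    unfold rhsDiv
    rw [if_pos ⟨hq2, ⟨k, hk⟩, hPdef ▸ hsq⟩]
  have hqP : q / P = u := by
    rw [hu]
    exact Int.mul_ediv_cancel_left u (by omega)
  have h1 : PySem.Int.floordiv i (rhsDiv q i) = P * k := by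
    rw [hrw, hqP, PySem.Int.floordiv_eq_ediv_of_pos hupos, hk, hu]
    rw [show P * u * k = u * (P * k) by ring]
    exact Int.mul_ediv_cancel_left _ (by omega)
  have hgcd : (Int.gcd i q : Int) = q :=
    (Int.gcd_greatest (by omega) ⟨k, hk⟩ dvd_rfl (fun e _ h => h)).symm
  have h2 : PySem.Int.floordiv i (Int.gcd i q) = k := by
    rw [hgcd, PySem.Int.floordiv_eq_ediv_of_pos hqpos, hk]
    rw [mul_comm]
    exact Int.mul_ediv_cancel k (by omega)
  rw [h1, h2]
  intro he
  have : (P - 1) * k = 0 := by linarith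
  rcases mul_eq_zero.mp this with h | h
  · omega
  · exact hk0 h
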